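-- pv_equiv track=rewrite | github.com/weim1643/CCC | 2020/junior_data/j4/solution.py | solution
-- ===== SOURCE A (Python) =====
-- def solution(s1, s2):
--     fe = []
--     for i in range(0, len(s2)):
--         fe.append(s2[i:] + s2[:i])
--     for i in range(0, len(fe)):
--         if fe[i] in s1:
--             return "yes"
--     return "no"
-- ===== SOURCE B (Python) =====
-- def solution(s1, s2):
--     m = len(s2)
--     doubled = s2 + s2
--     for j in range(len(s1) - m + 1):
--         if s1[j:j+m] in doubled:
--             return "yes"
--     return "no"
-- ===== Notes on version B (the rewrite author's own statement) =====
-- stated objective: faster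
-- what changed: Instead of materialising all rotations of s2 and running a substring search over s1 for each, B slides one window of length len(s2) over s1 and tests it against the doubled string s2+s2 (a window is a rotation iff it occurs in s2+s2), removing the per-rotation scans.
-- intended difference: When s2 is the empty string A returns 'no' (its rotation list is empty so the loop never runs), while B returns 'yes' because the empty string's only rotation, itself, occurs in every s1 - the intended answer. — e.g. on solution("a", ""): A returns "no", B returns "yes"
import Mathlib
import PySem

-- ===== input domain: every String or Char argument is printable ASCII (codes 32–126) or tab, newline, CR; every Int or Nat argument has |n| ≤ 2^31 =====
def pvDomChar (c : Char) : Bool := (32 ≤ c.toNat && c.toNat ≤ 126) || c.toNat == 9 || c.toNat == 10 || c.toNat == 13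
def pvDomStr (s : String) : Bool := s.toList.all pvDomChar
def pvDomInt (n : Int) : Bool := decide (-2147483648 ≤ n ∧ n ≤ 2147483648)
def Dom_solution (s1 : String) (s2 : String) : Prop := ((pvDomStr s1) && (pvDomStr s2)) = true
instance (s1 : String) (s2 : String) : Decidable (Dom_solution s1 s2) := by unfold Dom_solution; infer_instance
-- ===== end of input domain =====

-- B replaces A's "build every rotation of s2, substring-search s1 for each" by a single
-- sliding window over s1 tested against s2+s2 (objective: faster — no per-rotation scans).

-- ===== PORT A =====
-- fe = [s2[i:] + s2[:i] for i in range(len(s2))]; then scan fe: 'fe[i] in s1' → "yes", else "no"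
def solution (s1 : String) (s2 : String) : String :=
  let t1 := s1.toList
  let t2 := s2.toList
  let fe : List (List Char) :=
    (PySem.List.pyRange 0 (t2.length : Int) 1).foldl
      (fun acc i => acc ++ [PySem.List.slice t2 (some i) none ++ PySem.List.slice t2 none (some i)]) []
  if (PySem.List.pyRange 0 (fe.length : Int) 1).any
      (fun i => PySem.Chars.isIn (PySem.List.pyGetD fe i []) t1)
  then "yes" else "no"

-- ===== PORT B =====
-- m = len(s2); doubled = s2+s2; for j in range(len(s1)-m+1): if s1[j:j+m] in doubled → "yes"; else "no"
def solution_alt (s1 : String) (s2 : String) : String :=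
  let a := s1.toList
  let b := s2.toList
  let m : Int := b.length
  let doubled := b ++ b
  if (PySem.List.pyRange 0 ((a.length : Int) - m + 1) 1).any
      (fun j => PySem.Chars.isIn (PySem.List.slice a (some j) (some (j + m))) doubled)
  then "yes" else "no"

-- ===== PRECONDITION & SPEC =====
-- When s2 is the empty string A returns "no" (its rotation list is empty, so its loop never
-- runs), while B returns "yes": the empty string's only rotation, itself, occurs in every s1,
-- which is the intended answer.
def D_solution (s1 : String) (s2 : String) : Prop := s2 = ""
instance (s1 : String) (s2 : String) : Decidable (D_solution s1 s2) := by unfold D_solution; infer_instance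

def Spec_solution (s1 : String) (s2 : String) (out : String) : Prop := ¬ D_solution s1 s2 → out = solution_alt s1 s2
instance (s1 : String) (s2 : String) (out : String) : Decidable (Spec_solution s1 s2 out) := by unfold Spec_solution; infer_instance

def pvDiffWitness_solution : String × String := ("a", "")
def pvDiffWitnessOut_solution : String × String := ("no", "yes")

-- ===== CLAIM (what is proved, stated in full; the proofs are below) =====
def Claim_unchanged_solution : Prop := ∀ (s1 : String) (s2 : String), Dom_solution s1 s2 → Spec_solution s1 s2 (solution s1 s2)
def Claim_changed_solution : Prop := Dom_solution (pvDiffWitness_solution.1) (pvDiffWitness_solution.2) ∧ D_solution (pvDiffWitness_solution.1) (pvDiffWitness_solution.2) ∧ solution (pvDiffWitness_solution.1) (pvDiffWitness_solution.2) = pvDiffWitnessOut_solution.1 ∧ solution_alt (pvDiffWitness_solution.1) (pvDiffWitness_solution.2) = pvDiffWitnessOut_solution.2 ∧ pvDiffWitnessOut_solution.1 ≠ pvDiffWitnessOut_solution.2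
def Claim_exact_solution : Prop := ∀ (s1 : String) (s2 : String), Dom_solution s1 s2 → D_solution s1 s2 → solution s1 s2 ≠ solution_alt s1 s2

-- ===== LEMMAS AND PROOFS =====

-- the k-th rotation of t
def pvRot (t : List Char) (k : Nat) : List Char := t.drop k ++ t.take k

theorem pvRot_length (t : List Char) (k : Nat) (hk : k ≤ t.length) :
    (pvRot t k).length = t.length := by
  simp [pvRot]; omega

-- every rotation occurs in t ++ t
theorem pvRot_infix_doubled (t : List Char) (k : Nat) :
    pvRot t k <:+: t ++ t := by
  refine ⟨t.take k, t.drop k, ?_⟩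
  rw [pvRot]
  simp only [List.append_assoc]
  conv_lhs => rw [← List.append_assoc (t.take k), ← List.append_assoc,
    List.take_append_drop, List.append_assoc, List.take_append_drop]

-- dropping k ≤ |t| then taking |t| from t ++ t yields the k-th rotation
theorem pvDoubled_drop_take (t : List Char) (k : Nat) (hk : k ≤ t.length) :
    ((t ++ t).drop k).take t.length = pvRot t k := by
  have h1 : t ++ t = t.take k ++ (t.drop k ++ t) := by
    rw [← List.append_assoc, List.take_append_drop]
  have hlen : (t.take k).length = k := by simp [hk]
  rw [h1, List.drop_left' hlen, List.take_append]
  have h2 : (t.drop k).take t.length = t.drop k :=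
    List.take_of_length_le (by simp)
  have h3 : t.length - (t.drop k).length = k := by simp; omega
  rw [h2, h3]; rfl

-- a length-|t| infix of t ++ t is a rotation of t (t nonempty)
theorem pvInfix_doubled_rot (t w : List Char) (ht : t ≠ [])
    (hw : w.length = t.length) (h : w <:+: t ++ t) :
    ∃ k, k < t.length ∧ w = pvRot t k := by
  obtain ⟨u, v, huv⟩ := h
  have hul : u.length ≤ t.length := by
    have := congrArg List.length huv
    simp at this; omega
  have hweq : w = ((t ++ t).drop u.length).take t.length := by
    rw [← huv, List.append_assoc, List.drop_left, ← hw, List.take_left]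
  by_cases hcase : u.length = t.length
  · refine ⟨0, List.length_pos_of_ne_nil ht, ?_⟩
    rw [hweq, hcase, pvDoubled_drop_take t t.length le_rfl]
    simp [pvRot]
  · exact ⟨u.length, by omega, by rw [hweq, pvDoubled_drop_take t u.length hul]⟩

-- the window s1[j:j+m] is an infix of s1
theorem pvWindow_infix (a : List Char) (j m : Nat) :
    (a.drop j).take m <:+: a := by
  refine ⟨a.take j, (a.drop j).drop m, ?_⟩
  rw [List.append_assoc, List.take_append_drop, List.take_append_drop]

-- core equivalence: some rotation of t occurs in a ↔ some length-|t| window of a occurs in t ++ t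
theorem pvCore (a t : List Char) (ht : t ≠ []) :
    (∃ k, k < t.length ∧ pvRot t k <:+: a) ↔
    (∃ j, j + t.length ≤ a.length ∧ ((a.drop j).take t.length) <:+: t ++ t) := by
  constructor
  · rintro ⟨k, hk, u, v, huv⟩
    have hr := pvRot_length t k (le_of_lt hk)
    refine ⟨u.length, ?_, ?_⟩
    · have := congrArg List.length huv
      simp at this; omega
    · have hdrop : a.drop u.length = pvRot t k ++ v := by
        rw [← huv, List.append_assoc, List.drop_left]
      rw [hdrop, List.take_left' hr]
      exact pvRot_infix_doubled t k
  · rintro ⟨j, hj, hinf⟩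
    have hwlen : ((a.drop j).take t.length).length = t.length := by
      simp; omega
    obtain ⟨k, hk, hkeq⟩ := pvInfix_doubled_rot t _ ht hwlen hinf
    exact ⟨k, hk, hkeq ▸ pvWindow_infix a j t.length⟩

-- 'for i in range(len(L)): … L[i] …' scanned with any IS L.any
theorem pvAny_index (L : List (List Char)) (p : List Char → Bool) :
    ((PySem.List.pyRange 0 (L.length : Int) 1).any (fun i => p (PySem.List.pyGetD L i []))) = L.any p := by
  conv_rhs => rw [← PySem.List.map_pyGetD_pyRange_zero' (xs := L) (d := ([] : List Char))]
  rw [List.any_map]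
  rfl

-- A's test condition, characterised
theorem pvA_cond (t1 t2 : List Char) :
    ((PySem.List.pyRange 0 (((PySem.List.pyRange 0 (t2.length : Int) 1).foldl
        (fun acc i => acc ++ [PySem.List.slice t2 (some i) none ++ PySem.List.slice t2 none (some i)]) []).length : Int) 1).any
      (fun i => PySem.Chars.isIn (PySem.List.pyGetD ((PySem.List.pyRange 0 (t2.length : Int) 1).foldl
        (fun acc i => acc ++ [PySem.List.slice t2 (some i) none ++ PySem.List.slice t2 none (some i)]) []) i []) t1)) = true
    ↔ ∃ k, k < t2.length ∧ pvRot t2 k <:+: t1 := by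
  have h0 : ((PySem.List.pyRange 0 (((PySem.List.pyRange 0 (t2.length : Int) 1).foldl
        (fun acc i => acc ++ [PySem.List.slice t2 (some i) none ++ PySem.List.slice t2 none (some i)]) []).length : Int) 1).any
      (fun i => PySem.Chars.isIn (PySem.List.pyGetD ((PySem.List.pyRange 0 (t2.length : Int) 1).foldl
        (fun acc i => acc ++ [PySem.List.slice t2 (some i) none ++ PySem.List.slice t2 none (some i)]) []) i []) t1))
      = ((PySem.List.pyRange 0 (t2.length : Int) 1).map
          (fun i => PySem.List.slice t2 (some i) none ++ PySem.List.slice t2 none (some i))).any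
          (fun x => PySem.Chars.isIn x t1) := by
    rw [PySem.List.foldl_append_singleton_eq_map, List.nil_append]
    exact pvAny_index _ (fun x => PySem.Chars.isIn x t1)
  rw [h0, List.any_map, List.any_eq_true]
  constructor
  · rintro ⟨i, hi, hin⟩
    rw [PySem.List.mem_pyRange_one] at hi
    obtain ⟨k, rfl⟩ : ∃ k : Nat, i = (k : Int) := ⟨i.toNat, by omega⟩
    refine ⟨k, by exact_mod_cast hi.2, ?_⟩
    rw [← PySem.Chars.isIn_iff_infix]
    simpa [PySem.List.slice_from_natCast, PySem.List.slice_to_natCast, pvRot] using hin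
  · rintro ⟨k, hk, hin⟩
    refine ⟨(k : Int), PySem.List.mem_pyRange_one.mpr ⟨by omega, by exact_mod_cast hk⟩, ?_⟩
    simp only [Function.comp, PySem.List.slice_from_natCast, PySem.List.slice_to_natCast]
    rw [← pvRot]
    exact (PySem.Chars.isIn_iff_infix _ _).mpr hin

-- B's test condition, characterised
theorem pvB_cond (t1 t2 : List Char) :
    ((PySem.List.pyRange 0 ((t1.length : Int) - (t2.length : Int) + 1) 1).any
      (fun j => PySem.Chars.isIn (PySem.List.slice t1 (some j) (some (j + (t2.length : Int)))) (t2 ++ t2))) = true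
    ↔ ∃ j, j + t2.length ≤ t1.length ∧ ((t1.drop j).take t2.length) <:+: t2 ++ t2 := by
  rw [List.any_eq_true]
  constructor
  · rintro ⟨i, hi, hin⟩
    rw [PySem.List.mem_pyRange_one] at hi
    obtain ⟨j, rfl⟩ : ∃ j : Nat, i = (j : Int) := ⟨i.toNat, by omega⟩
    refine ⟨j, by omega, ?_⟩
    rw [← PySem.Chars.isIn_iff_infix]
    simpa [PySem.List.slice_natCast_add] using hin
  · rintro ⟨j, hj, hin⟩
    refine ⟨(j : Int), PySem.List.mem_pyRange_one.mpr ⟨by omega, by omega⟩, ?_⟩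
    rw [PySem.List.slice_natCast_add]
    exact (PySem.Chars.isIn_iff_infix _ _).mpr hin

-- the two test conditions are equal Booleans when t2 ≠ []
theorem pvConds (t1 t2 : List Char) (ht : t2 ≠ []) :
    ((PySem.List.pyRange 0 (((PySem.List.pyRange 0 (t2.length : Int) 1).foldl
        (fun acc i => acc ++ [PySem.List.slice t2 (some i) none ++ PySem.List.slice t2 none (some i)]) []).length : Int) 1).any
      (fun i => PySem.Chars.isIn (PySem.List.pyGetD ((PySem.List.pyRange 0 (t2.length : Int) 1).foldl
        (fun acc i => acc ++ [PySem.List.slice t2 (some i) none ++ PySem.List.slice t2 none (some i)]) []) i []) t1))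
    = ((PySem.List.pyRange 0 ((t1.length : Int) - (t2.length : Int) + 1) 1).any
      (fun j => PySem.Chars.isIn (PySem.List.slice t1 (some j) (some (j + (t2.length : Int)))) (t2 ++ t2))) :=
  Bool.eq_iff_iff.mpr ((pvA_cond t1 t2).trans ((pvCore t1 t2 ht).trans (pvB_cond t1 t2).symm))

theorem pvToList_ne_nil (s : String) (h : s ≠ "") : s.toList ≠ [] := by
  simpa using h

-- ===== VERDICT (by name: the statement is the Claim_ definition above) =====
theorem solution_spec : Claim_unchanged_solution := by
  intro s1 s2 _ hD
  rw [D_solution] at hD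
  show solution s1 s2 = solution_alt s1 s2
  simp only [solution, solution_alt]
  rw [pvConds s1.toList s2.toList (pvToList_ne_nil s2 hD)]

theorem solution_changed : Claim_changed_solution := by
  unfold Claim_changed_solution; decide

theorem solution_tight : Claim_exact_solution := by
  intro s1 s2 _ hD
  rw [D_solution] at hD
  subst hD
  have hA : solution s1 "" = "no" := by
    simp only [solution]
    rw [show ("".toList : List Char) = [] from rfl]
    simp [PySem.List.pyRange_one_eq_nil (le_refl (0 : Int))]
  have hB : solution_alt s1 "" = "yes" := by
    simp only [solution_alt]
    rw [show ("".toList : List Char) = [] from rfl]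
    have hany : ((PySem.List.pyRange 0 ((s1.toList.length : Int) - (([] : List Char).length : Int) + 1) 1).any
        (fun j => PySem.Chars.isIn (PySem.List.slice s1.toList (some j) (some (j + (([] : List Char).length : Int)))) (([] : List Char) ++ []))) = true := by
      rw [List.any_eq_true]
      refine ⟨0, PySem.List.mem_pyRange_one.mpr ⟨le_refl 0, by simp⟩, ?_⟩
      have hsl : PySem.List.slice s1.toList (some (0 : Int)) (some ((0 : Int) + (([] : List Char).length : Int))) = ([] : List Char) := by
        simp [PySem.List.slice_to (xs := s1.toList) (b := (0:Int)) (le_refl (0:Int))]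
      rw [hsl]
      exact PySem.Chars.isIn_nil _
    rw [hany]
    simp
  rw [hA, hB]; decide
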